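-- pv_equiv track=rewrite | github.com/Lucchese-Anthony/Encrypted-Messaging-Service | client.py | convertNumberToString
-- ===== SOURCE A (Python) =====
-- letterConversions:dict = {
-- "A":"01","B":"02","C":"03","D":"04","E":"05",
-- "F":"06","G":"07","H":"08","I":"09","J":"10",
-- "K":"11","L":"12","M":"13","N":"14","O":"15",
-- "P":"16","Q":"17","R":"18","S":"19","T":"20",
-- "U":"21","V":"22","W":"23","X":"24","Y":"25",
-- "Z":"26"}
--
-- def convertNumberToString(number:int) -> str:
--     string = ""
--     number = str(number)
--     if len(number) % 2 != 0:
--         number = "0" + number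
--     for i in range(0, len(number), 2):
--         string += list(letterConversions.keys())[list(letterConversions.values()).index(number[i:i+2])]
--     return string
-- ===== SOURCE B (Python) =====
-- def convertNumberToString(number: int) -> str:
--     # Arithmetic on base-100 chunks instead of string slicing + table reverse-lookup.
--     letters = []
--     n = number
--     while n > 0:
--         chunk = n % 100
--         if not 1 <= chunk <= 26:
--             raise ValueError("substring not found")
--         letters.append(chr(64 + chunk))
--         n //= 100
--     return ''.join(reversed(letters))
-- ===== Notes on version B (the rewrite author's own statement) =====
-- stated objective: alternative
-- what changed: Replaces str(number) padding/slicing and a per-chunk rebuild of the dict's key/value lists with a .index linear scan by direct base-100 arithmetic (n % 100 -> chr(64+chunk)), building the letters back-to-front.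
-- outside the precondition, e.g. on convertNumberToString(0): A raises ValueError, B returns ''; on convertNumberToString(100): A raises ValueError, B raises ValueError
import Mathlib
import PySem

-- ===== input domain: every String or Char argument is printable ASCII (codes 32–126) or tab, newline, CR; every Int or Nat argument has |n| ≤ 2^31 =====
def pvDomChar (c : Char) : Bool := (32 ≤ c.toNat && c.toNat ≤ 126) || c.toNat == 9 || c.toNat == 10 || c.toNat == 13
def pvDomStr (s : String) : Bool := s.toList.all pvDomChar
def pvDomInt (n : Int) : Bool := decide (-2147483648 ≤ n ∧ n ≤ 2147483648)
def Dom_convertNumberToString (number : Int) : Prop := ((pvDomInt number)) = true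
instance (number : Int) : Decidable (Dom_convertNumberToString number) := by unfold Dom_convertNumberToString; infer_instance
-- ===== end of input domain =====

-- B replaces A's string padding/slicing + per-chunk reverse lookup through the dict's key/value
-- lists by direct base-100 arithmetic (chunk = n % 100 → chr(64+chunk)), built back-to-front.
-- Equality is about the RETURN value on Pre_ (inputs where A returns normally).

-- ===== PORT A =====
def lcDict : PySem.Dict String String :=
  PySem.Dict.ofList
    [("A","01"),("B","02"),("C","03"),("D","04"),("E","05"),
     ("F","06"),("G","07"),("H","08"),("I","09"),("J","10"),
     ("K","11"),("L","12"),("M","13"),("N","14"),("O","15"),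
     ("P","16"),("Q","17"),("R","18"),("S","19"),("T","20"),
     ("U","21"),("V","22"),("W","23"),("X","24"),("Y","25"),
     ("Z","26")]

-- literal transliteration of A; the failing `.index` lookup (ValueError) surfaces as `none`,
-- whose `getD ""` is only reached outside Pre_.
def convertNumberToString (number : Int) : String :=
  let string : String := ""
  let s0 : String := PySem.Int.toStr number
  let s : String := if ¬ (PySem.Str.len s0 % 2 = 0) then "0" ++ s0 else s0
  (PySem.List.pyRange 0 (PySem.Str.len s) 2).foldl
    (fun acc i =>
      acc ++ (((PySem.List.index? (PySem.Dict.values lcDict)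
                  (PySem.Str.slice s (some i) (some (i + 2)))).bind
          (fun j => PySem.List.pyGet? (PySem.Dict.keys lcDict) (j : Int))).getD ""))
    string

-- ===== PORT B =====
-- B's while-loop over n : the loop runs only while n > 0, so working on number.toNat is exact;
-- the `else letters` arm is where Python B raises ValueError (outside Pre_).
def altLoop (n : Nat) (letters : List Char) : List Char :=
  if h : 0 < n then
    let chunk := n % 100
    if 1 ≤ chunk ∧ chunk ≤ 26 then
      altLoop (n / 100) (letters ++ [Char.ofNat (64 + chunk)])
    else letters
  else letters
termination_by n
decreasing_by exact Nat.div_lt_self h (by norm_num)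

def convertNumberToString_alt (number : Int) : String :=
  String.ofList (List.reverse (altLoop number.toNat []))

-- ===== PRECONDITION & SPEC =====
-- Pre_ = exactly the inputs on which A returns: number ≥ 1 and every base-100 chunk of its
-- decimal representation is in 1..26 (otherwise list.index raises ValueError; number ≤ 0 also
-- raises since the chunk "00" or a '-' chunk is not among the dict values).  Under Dom
-- (|number| ≤ 2^31 < 100^5) five chunks suffice.
def Pre_convertNumberToString (number : Int) : Prop :=
  1 ≤ number ∧ ∀ k < 5, number.toNat / 100 ^ k ≠ 0 →
    1 ≤ number.toNat / 100 ^ k % 100 ∧ number.toNat / 100 ^ k % 100 ≤ 26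
instance (number : Int) : Decidable (Pre_convertNumberToString number) := by
  unfold Pre_convertNumberToString; infer_instance

def pvWitness_convertNumberToString : Int := 123

def Spec_convertNumberToString (number : Int) (out : String) : Prop := out = convertNumberToString_alt number
instance (number : Int) (out : String) : Decidable (Spec_convertNumberToString number out) := by
  unfold Spec_convertNumberToString; infer_instance

-- ===== CLAIM (what is proved, stated in full; the proofs are below) =====
def Claim_equal_convertNumberToString : Prop := ∀ (number : Int), Dom_convertNumberToString number → Pre_convertNumberToString number → Spec_convertNumberToString number (convertNumberToString number)

-- ===== LEMMAS AND PROOFS =====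

/-! ### chunk goodness -/

def GoodN (n : Nat) : Prop :=
  ∀ k, n / 100 ^ k ≠ 0 → 1 ≤ n / 100 ^ k % 100 ∧ n / 100 ^ k % 100 ≤ 26

lemma good_of_pre (n : Nat) (hn : n ≤ 2147483648)
    (h : ∀ k < 5, n / 100 ^ k ≠ 0 → 1 ≤ n / 100 ^ k % 100 ∧ n / 100 ^ k % 100 ≤ 26) :
    GoodN n := by
  intro k hk
  by_cases h5 : k < 5
  · exact h k h5 hk
  · exfalso; apply hk
    apply Nat.div_eq_of_lt
    calc n ≤ 2147483648 := hn
      _ < 100 ^ 5 := by norm_num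
      _ ≤ 100 ^ k := Nat.pow_le_pow_right (by norm_num) (by omega)

lemma good_div {n : Nat} (h : GoodN n) : GoodN (n / 100) := by
  intro k hk
  have e : n / 100 / 100 ^ k = n / 100 ^ (k + 1) := by
    rw [Nat.div_div_eq_div_mul, pow_succ, Nat.mul_comm]
  rw [e] at hk ⊢
  exact h (k + 1) hk

lemma good_mod {n : Nat} (h : GoodN n) (hn : n ≠ 0) : 1 ≤ n % 100 ∧ n % 100 ≤ 26 := by
  have := h 0 (by simpa using hn)
  simpa using this

/-! ### the common chunk string -/

def specChunks (n : Nat) : List Char :=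
  if h : n = 0 then [] else specChunks (n / 100) ++ [Char.ofNat (64 + n % 100)]
termination_by n
decreasing_by exact Nat.div_lt_self (Nat.pos_of_ne_zero h) (by norm_num)

lemma specChunks_zero : specChunks 0 = [] := by simp [specChunks]

lemma specChunks_pos {n : Nat} (h : n ≠ 0) :
    specChunks n = specChunks (n / 100) ++ [Char.ofNat (64 + n % 100)] := by
  rw [specChunks]; simp [h]

/-! ### B equals specChunks -/

lemma altLoop_eq (n : Nat) (hg : GoodN n) :
    ∀ acc, altLoop n acc = acc ++ (specChunks n).reverse := by
  induction n using Nat.strong_induction_on with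
  | _ n ih =>
    intro acc
    by_cases h : 0 < n
    · have hc := good_mod hg (by omega)
      rw [altLoop, dif_pos h]
      simp only []
      rw [if_pos hc]
      rw [ih (n / 100) (Nat.div_lt_self h (by norm_num)) (good_div hg) (acc ++ [Char.ofNat (64 + n % 100)])]
      rw [specChunks_pos (by omega : n ≠ 0)]
      simp [List.reverse_append]
    · have h0 : n = 0 := by omega
      subst h0
      rw [altLoop]
      simp [specChunks_zero]

lemma alt_eq (number : Int) (hg : GoodN number.toNat) :
    convertNumberToString_alt number = String.ofList (specChunks number.toNat) := by
  unfold convertNumberToString_alt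
  rw [altLoop_eq _ hg, List.nil_append, List.reverse_reverse]

/-! ### Nat.toDigits structure -/

lemma tdc_acc : ∀ (f n : Nat) (acc : List Char),
    Nat.toDigitsCore 10 f n acc = Nat.toDigitsCore 10 f n [] ++ acc := by
  intro f
  induction f with
  | zero => intro n acc; simp [Nat.toDigitsCore]
  | succ f ih =>
    intro n acc
    simp only [Nat.toDigitsCore]
    by_cases h : n / 10 = 0
    · simp [h]
    · simp only [h, if_neg]
      rw [ih (n / 10) [Nat.digitChar (n % 10)], ih (n / 10) (Nat.digitChar (n % 10) :: acc)]
      simp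

lemma tdc_fuel : ∀ (f f' n : Nat), n < f → n < f' →
    Nat.toDigitsCore 10 f n [] = Nat.toDigitsCore 10 f' n [] := by
  intro f
  induction f with
  | zero => intro f' n h; omega
  | succ f ih =>
    intro f' n hf hf'
    cases f' with
    | zero => omega
    | succ f'' =>
      simp only [Nat.toDigitsCore]
      by_cases h : n / 10 = 0
      · simp [h]
      · simp only [h, if_neg]
        rw [tdc_acc f, tdc_acc f'']
        have hlt : n / 10 < n := Nat.div_lt_self (by omega) (by norm_num)
        rw [ih f'' (n / 10) (by omega) (by omega)]

lemma toDigits_lt {n : Nat} (h : n < 10) : Nat.toDigits 10 n = [Nat.digitChar n] := by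
  unfold Nat.toDigits
  simp [Nat.toDigitsCore, Nat.div_eq_of_lt h, Nat.mod_eq_of_lt h]

lemma toDigits_step {n : Nat} (h : 10 ≤ n) :
    Nat.toDigits 10 n = Nat.toDigits 10 (n / 10) ++ [Nat.digitChar (n % 10)] := by
  have h0 : ¬ n / 10 = 0 := by
    intro hc; have := Nat.div_eq_of_lt (show n < 10 by omega); omega
  have e1 : Nat.toDigits 10 n = Nat.toDigitsCore 10 n (n / 10) [Nat.digitChar (n % 10)] := by
    unfold Nat.toDigits
    simp only [Nat.toDigitsCore]
    rw [if_neg h0]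
  rw [e1, tdc_acc]
  congr 1
  have e2 : Nat.toDigits 10 (n / 10) = Nat.toDigitsCore 10 (n / 10 + 1) (n / 10) [] := rfl
  rw [e2]
  exact tdc_fuel n (n / 10 + 1) (n / 10) (Nat.div_lt_self (by omega) (by norm_num)) (by omega)

lemma toDigits_step100 {n : Nat} (h : 100 ≤ n) :
    Nat.toDigits 10 n
      = Nat.toDigits 10 (n / 100) ++ [Nat.digitChar (n / 10 % 10), Nat.digitChar (n % 10)] := by
  rw [toDigits_step (by omega : 10 ≤ n)]
  rw [toDigits_step (by omega : 10 ≤ n / 10)]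
  rw [Nat.div_div_eq_div_mul]
  simp

/-! ### the padded decimal string -/

def padded (n : Nat) : List Char :=
  if (Nat.toDigits 10 n).length % 2 ≠ 0 then '0' :: Nat.toDigits 10 n else Nat.toDigits 10 n

lemma padded_even (n : Nat) : (padded n).length % 2 = 0 := by
  unfold padded
  split_ifs with h <;> simp_all <;> omega

lemma padded_small {n : Nat} (h : n < 100) :
    padded n = [Nat.digitChar (n / 10), Nat.digitChar (n % 10)] := by
  unfold padded
  by_cases h10 : n < 10
  · rw [toDigits_lt h10]
    rw [Nat.div_eq_of_lt h10, Nat.mod_eq_of_lt h10]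
    simp
    decide
  · rw [toDigits_step (by omega), toDigits_lt (by omega : n / 10 < 10)]
    simp

lemma padded_step {n : Nat} (h : 100 ≤ n) :
    padded n = padded (n / 100) ++ [Nat.digitChar (n / 10 % 10), Nat.digitChar (n % 10)] := by
  unfold padded
  rw [toDigits_step100 h]
  have hlen : (Nat.toDigits 10 (n / 100)
      ++ [Nat.digitChar (n / 10 % 10), Nat.digitChar (n % 10)]).length
      = (Nat.toDigits 10 (n / 100)).length + 2 := by simp
  split_ifs with h1 h2 h2
  · simp
  · rw [hlen] at h1; omega
  · rw [hlen] at h1; omega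
  · rfl

/-! ### A's loop as a fold over chunks -/

def lookup2 (t : String) : String :=
  ((PySem.List.index? (PySem.Dict.values lcDict) t).bind
      (fun j => PySem.List.pyGet? (PySem.Dict.keys lcDict) (j : Int))).getD ""

def chunkFold (l : List Char) (acc : String) : String :=
  (PySem.List.pyRange 0 (l.length) 2).foldl
    (fun acc i => acc ++ lookup2 (PySem.Str.slice (String.ofList l) (some i) (some (i + 2)))) acc

lemma lookup2_letter {m : Nat} (h1 : 1 ≤ m) (h2 : m ≤ 26) :
    lookup2 (String.ofList [Nat.digitChar (m / 10), Nat.digitChar (m % 10)])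
      = String.ofList [Char.ofNat (64 + m)] := by
  interval_cases m <;> decide

lemma pyRange_two (m : Nat) :
    PySem.List.pyRange 0 (2 * m : Nat) 2 = (List.range m).map (fun k => ((2 * k : Nat) : Int)) := by
  rw [PySem.List.pyRange_of_pos _ _ (by norm_num)]
  cases m with
  | zero => simp
  | succ m =>
    rw [if_pos (by push_cast; omega)]
    have he : ((((2 * (m + 1) : Nat)) : Int) - 0 + 2 - 1) / 2 = ((m + 1 : Nat) : Int) := by
      push_cast; omega
    rw [he, Int.toNat_natCast]
    apply List.map_congr_left
    intro k _
    push_cast; ring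

lemma slice_eq_of_prefix (l t : List Char) (i : Nat) (hi : i + 2 ≤ l.length) :
    PySem.Str.slice (String.ofList (l ++ t)) (some (i : Int)) (some ((i : Int) + 2))
      = PySem.Str.slice (String.ofList l) (some (i : Int)) (some ((i : Int) + 2)) := by
  apply String.ext
  simp only [PySem.Str.toList_slice, PySem.Chars.slice_eq_listSlice]
  have h2 : ((i : Int) + 2) = ((i : Int) + ((2 : Nat) : Int)) := by push_cast; ring
  rw [h2, PySem.List.slice_natCast_add, PySem.List.slice_natCast_add]
  simp only [String.toList_ofList]
  rw [List.drop_append_of_le_length (by omega)]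
  rw [List.take_append_of_le_length (by simp; omega)]

lemma chunkFold_nil (acc : String) : chunkFold [] acc = acc := by
  unfold chunkFold
  simp [PySem.List.pyRange_of_pos]

lemma chunkFold_append (l : List Char) (a b : Char) (hev : l.length % 2 = 0) (acc : String) :
    chunkFold (l ++ [a, b]) acc = chunkFold l acc ++ lookup2 (String.ofList [a, b]) := by
  obtain ⟨m, hm⟩ : ∃ m, l.length = 2 * m := ⟨l.length / 2, by omega⟩
  unfold chunkFold
  have hlen : ((l ++ [a, b]).length : Nat) = 2 * (m + 1) := by simp [hm]; omega
  rw [hlen, hm, pyRange_two, pyRange_two, List.range_succ, List.map_append, List.foldl_append]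
  have hcongr :
      List.foldl (fun acc i =>
          acc ++ lookup2 (PySem.Str.slice (String.ofList (l ++ [a, b])) (some i) (some (i + 2))))
        acc ((List.range m).map (fun k => ((2 * k : Nat) : Int)))
      = List.foldl (fun acc i =>
          acc ++ lookup2 (PySem.Str.slice (String.ofList l) (some i) (some (i + 2))))
        acc ((List.range m).map (fun k => ((2 * k : Nat) : Int))) := by
    apply PySem.List.foldl_congr_mem
    intro acc' x hx
    simp only [List.mem_map, List.mem_range] at hx
    obtain ⟨k, hk, rfl⟩ := hx
    rw [slice_eq_of_prefix l [a, b] (2 * k) (by omega)]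
  rw [hcongr]
  simp only [List.map_cons, List.map_nil, List.foldl_cons, List.foldl_nil]
  congr 1
  congr 1
  apply String.ext
  simp only [PySem.Str.toList_slice, PySem.Chars.slice_eq_listSlice]
  have h2 : (((2 * m : Nat) : Int) + 2) = (((2 * m : Nat) : Int) + ((2 : Nat) : Int)) := by
    push_cast; ring
  rw [h2, PySem.List.slice_natCast_add]
  simp only [String.toList_ofList]
  rw [← hm]
  rw [show List.drop l.length (l ++ [a, b]) = [a, b] from by
    rw [List.drop_append_of_le_length (by omega)]
    simp]
  rfl

/-! ### A equals specChunks -/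

lemma chunkFold_padded (n : Nat) (h1 : 1 ≤ n) (hg : GoodN n) :
    chunkFold (padded n) "" = String.ofList (specChunks n) := by
  induction n using Nat.strong_induction_on with
  | _ n ih =>
    by_cases h : n < 100
    · have hc := good_mod hg (by omega)
      rw [Nat.mod_eq_of_lt h] at hc
      rw [padded_small h]
      rw [show ([Nat.digitChar (n / 10), Nat.digitChar (n % 10)] : List Char)
          = [] ++ [Nat.digitChar (n / 10), Nat.digitChar (n % 10)] by simp]
      rw [chunkFold_append [] _ _ (by simp) "", chunkFold_nil]
      rw [show n / 10 = n % 100 / 10 by omega, show n % 10 = n % 100 % 10 by omega]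
      rw [lookup2_letter (by omega : 1 ≤ n % 100) (by omega : n % 100 ≤ 26)]
      rw [specChunks_pos (by omega : n ≠ 0), Nat.div_eq_of_lt h, specChunks_zero]
      apply String.ext
      simp
    · have hc := good_mod hg (by omega)
      rw [padded_step (by omega)]
      rw [chunkFold_append _ _ _ (padded_even (n / 100)) ""]
      rw [ih (n / 100) (Nat.div_lt_self (by omega) (by norm_num)) (by omega) (good_div hg)]
      rw [show n / 10 % 10 = n % 100 / 10 by omega, show n % 10 = n % 100 % 10 by omega]
      rw [lookup2_letter hc.1 hc.2]
      rw [specChunks_pos (show n ≠ 0 by omega)]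
      apply String.ext
      simp

lemma A_eq_chunkFold (number : Int) (h1 : 1 ≤ number) :
    convertNumberToString number = chunkFold (padded number.toNat) "" := by
  have hstr : PySem.Int.toStr number = String.ofList (Nat.toDigits 10 number.toNat) := by
    unfold PySem.Int.toStr PySem.Int.toChars
    rw [if_neg (by omega)]
  have hlen : ∀ (l : List Char), PySem.Str.len (String.ofList l) = (l.length : Int) := by
    intro l; rw [PySem.Str.len_eq]; simp
  simp only [convertNumberToString, hstr, hlen]
  unfold chunkFold lookup2 padded
  by_cases hodd : (Nat.toDigits 10 number.toNat).length % 2 = 0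
  · rw [if_neg (by omega), if_neg (by omega), hlen]
  · rw [if_pos (by omega), if_pos (by omega)]
    rw [show ("0" ++ String.ofList (Nat.toDigits 10 number.toNat))
        = String.ofList ('0' :: Nat.toDigits 10 number.toNat) from by apply String.ext; simp]
    rw [hlen]

/-! ### the verdict -/

lemma main_eq (number : Int) (hdom : Dom_convertNumberToString number)
    (hpre : Pre_convertNumberToString number) :
    convertNumberToString number = convertNumberToString_alt number := by
  obtain ⟨h1, h2⟩ := hpre
  have hbound : number.toNat ≤ 2147483648 := by
    unfold Dom_convertNumberToString pvDomInt at hdom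
    simp at hdom
    omega
  have hg : GoodN number.toNat := good_of_pre _ hbound h2
  rw [A_eq_chunkFold number h1, chunkFold_padded _ (by omega) hg, alt_eq number hg]

-- ===== VERDICT (by name: the statement is the Claim_ definition above) =====
theorem convertNumberToString_spec : Claim_equal_convertNumberToString := by
  intro number hdom hpre
  unfold Spec_convertNumberToString
  exact main_eq number hdom hpre
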